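-- pv_equiv track=rewrite | github.com/bradtreloar/freeCodeCamp_DP_problems | problems/best_construct.py | best_construct
-- ===== SOURCE A (Python) =====
-- from typing import List, Optional, Tuple
--
-- def best_construct(target_string: str, strings: List[str], memo=None) -> Optional[List[str]]:
--     # Memo.
--     if memo is None:
--         memo = {}
--     if target_string in memo:
--         return memo[target_string]
--     # Base case.
--     if len(target_string) == 0:
--         return []
--     # Keep one of the equal shortest solutions.
--     memo[target_string] = None
--     for string in strings:
--         length_is_ok = len(string) <= len(target_string)
--         match_at_start = target_string[:len(string)] == string
--         if length_is_ok and match_at_start: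
--             remainder = target_string[len(string):]
--             solution = best_construct(remainder, strings, memo)
--             if solution is not None:
--                 if memo[target_string] is None or len(solution) < len(memo[target_string]):
--                     memo[target_string] = solution
--     return memo[target_string]
-- ===== SOURCE B (Python) =====
-- from typing import List, Optional
--
-- def best_construct(target_string: str, strings: List[str], memo=None) -> Optional[List[str]]:
--     # Bottom-up DP over suffix start positions instead of memoized recursion.
--     # Note: unlike the original, this does not mutate a caller-supplied memo dict
--     # (the return value is identical; only the side effect on `memo` differs).
--     lookup = memo if memo is not None else {}
--     if target_string in lookup:
--         return lookup[target_string]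
--     n = len(target_string)
--     val = [None] * (n + 1)
--     for i in reversed(range(n + 1)):
--         suffix = target_string[i:]
--         if suffix in lookup:
--             val[i] = lookup[suffix]
--         elif i == n:
--             val[i] = []
--         else:
--             best = None
--             for s in strings:
--                 if s and target_string[i:i + len(s)] == s:
--                     cand = val[i + len(s)]
--                     if cand is not None and (best is None or len(cand) < len(best)):
--                         best = cand
--             val[i] = best
--     return val[0]
-- ===== Notes on version B (the rewrite author's own statement) =====
-- stated objective: alternative
-- what changed: Replaces the memoized top-down recursion that threads a mutable dict through recursive calls by an iterative bottom-up DP: a value array indexed by suffix start position is filled from the end of the target to the front, so the recursion (and the memo mutation) disappears; caller-supplied memo entries are still honoured as overrides for their suffixes.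
import Mathlib
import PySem

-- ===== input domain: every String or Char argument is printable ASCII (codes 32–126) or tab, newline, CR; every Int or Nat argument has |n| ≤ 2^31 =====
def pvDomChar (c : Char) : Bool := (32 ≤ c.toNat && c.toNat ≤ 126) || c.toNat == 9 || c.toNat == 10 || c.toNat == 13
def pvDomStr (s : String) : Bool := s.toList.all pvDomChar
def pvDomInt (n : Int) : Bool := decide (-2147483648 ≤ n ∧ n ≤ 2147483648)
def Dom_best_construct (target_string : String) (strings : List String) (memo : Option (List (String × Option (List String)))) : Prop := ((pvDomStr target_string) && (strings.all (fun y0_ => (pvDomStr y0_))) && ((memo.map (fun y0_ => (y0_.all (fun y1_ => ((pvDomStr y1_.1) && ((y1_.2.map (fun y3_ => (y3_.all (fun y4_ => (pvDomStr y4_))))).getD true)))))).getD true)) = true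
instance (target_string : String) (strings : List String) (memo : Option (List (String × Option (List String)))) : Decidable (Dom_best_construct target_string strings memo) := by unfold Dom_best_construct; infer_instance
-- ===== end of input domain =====

-- B replaces A's memoized top-down recursion (which mutates the memo dict) by an iterative
-- bottom-up DP over suffix start positions; same return value everywhere, but B performs no
-- observable mutation of a caller-supplied memo (the equivalence proved is about the return value).

-- ===== PORT A =====
-- literal port of A; the recursion is made total by a fuel counter (target.length + 2 is
-- proved sufficient below: the fuel branch is never reached), everything else is step for step.
mutual
def bcA : Nat → String → List String → PySem.Dict String (Option (List String)) →
    Option (List String) × PySem.Dict String (Option (List String))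
  | 0, _, _, memo => (none, memo)          -- fuel exhausted (unreachable for the fuel used below)
  | Nat.succ f, target_string, strings, memo =>
    match PySem.Dict.get? memo target_string with
    | some v => (v, memo)                  -- if target_string in memo: return memo[target_string]
    | none =>
      if PySem.Str.len target_string = 0 then (some [], memo)   -- base case: return []
      else
        -- memo[target_string] = None
        let memo1 := PySem.Dict.insert memo target_string none
        let memo2 := bcAloop f target_string strings strings memo1
        -- return memo[target_string]  (the key is always present here)
        ((PySem.Dict.get? memo2 target_string).getD none, memo2)
  termination_by f _ _ _ => (f, 0)
  decreasing_by all_goals (simp [Prod.lex_iff]; try omega)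

def bcAloop : Nat → String → List String → List String →
    PySem.Dict String (Option (List String)) → PySem.Dict String (Option (List String))
  | _, _, _, [], memo => memo
  | f, target_string, strings, s :: rest, memo =>
    let length_is_ok := PySem.Str.len s ≤ PySem.Str.len target_string
    let match_at_start := PySem.Str.slice target_string none (some (PySem.Str.len s)) = s
    if length_is_ok ∧ match_at_start then
      let remainder := PySem.Str.slice target_string (some (PySem.Str.len s)) none
      let res := bcA f remainder strings memo
      let memo'' :=
        match res.1 with
        | none => res.2                                       -- solution is None: no update
        | some sol =>
          match (PySem.Dict.get? res.2 target_string).getD none with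
          | none => PySem.Dict.insert res.2 target_string (some sol)
          | some cur =>
            if sol.length < cur.length then PySem.Dict.insert res.2 target_string (some sol)
            else res.2
      bcAloop f target_string strings rest memo''
    else bcAloop f target_string strings rest memo
  termination_by f _ _ rest _ => (f, rest.length + 1)
  decreasing_by all_goals (simp [Prod.lex_iff]; try omega)
end

def best_construct (target_string : String) (strings : List String) (memo : Option (List (String × Option (List String)))) : Option (List String) :=
  -- if memo is None: memo = {}
  let memoDict := PySem.Dict.ofList (memo.getD [])
  (bcA (target_string.length + 2) target_string strings memoDict).1

-- ===== PORT B =====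
-- literal port of Source B: bottom-up DP array over suffix start positions.
def best_construct_alt (target_string : String) (strings : List String) (memo : Option (List (String × Option (List String)))) : Option (List String) :=
  let lookup := PySem.Dict.ofList (memo.getD [])
  match PySem.Dict.get? lookup target_string with
  | some v => v                                          -- if target_string in lookup
  | none =>
    let n := target_string.length
    let val0 : List (Option (List String)) := List.replicate (n + 1) none   -- [None] * (n+1)
    let val := ((List.range (n + 1)).reverse).foldl (fun (val : List (Option (List String))) (i : Nat) =>          -- for i in reversed(range(n+1))
      let suffix := PySem.Str.slice target_string (some (i : Int)) none
      match PySem.Dict.get? lookup suffix with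
      | some v => val.set i v                            -- if suffix in lookup
      | none =>
        if i = n then val.set i (some [])                -- elif i == n
        else
          let best := strings.foldl (fun best s =>
            if s ≠ "" ∧ PySem.Str.slice target_string (some (i : Int)) (some ((i : Int) + (s.length : Int))) = s then
              match val.getD (i + s.length) none with    -- val[i + len(s)], index in range here
              | none => best                             -- cand is None
              | some cand =>
                match best with
                | none => some cand
                | some b => if cand.length < b.length then some cand else best
            else best) none
          val.set i best) val0
    val.getD 0 none                                      -- return val[0], index in range

-- ===== PRECONDITION & SPEC =====
def Spec_best_construct (target_string : String) (strings : List String) (memo : Option (List (String × Option (List String)))) (out : Option (List String)) : Prop := out = best_construct_alt target_string strings memo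
instance (target_string : String) (strings : List String) (memo : Option (List (String × Option (List String)))) (out : Option (List String)) : Decidable (Spec_best_construct target_string strings memo out) := by unfold Spec_best_construct; infer_instance

-- ===== CLAIM (what is proved, stated in full; the proofs are below) =====
def Claim_equal_best_construct : Prop := ∀ (target_string : String) (strings : List String) (memo : Option (List (String × Option (List String)))), Dom_best_construct target_string strings memo → Spec_best_construct target_string strings memo (best_construct target_string strings memo)

-- ===== LEMMAS AND PROOFS =====

-- the common specification: the value both ports compute, by recursion on the suffix
def mergeBest (cur sol : Option (List String)) : Option (List String) :=
  match sol with
  | none => cur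
  | some x =>
    match cur with
    | none => some x
    | some c => if x.length < c.length then some x else cur

-- length of t[a:] (needed for specV's termination)
theorem strSliceFrom_length (t : String) (a : Nat) :
    (PySem.Str.slice t (some (a : Int)) none).length = t.length - a := by
  rw [← String.length_toList, PySem.Str.toList_slice, PySem.Chars.slice_eq_listSlice,
    PySem.List.slice_from_natCast, List.length_drop, String.length_toList]

mutual
def specV (strings : List String) (memo0 : PySem.Dict String (Option (List String))) (t : String) : Option (List String) :=
  match PySem.Dict.get? memo0 t with
  | some v => v
  | none =>
    if t.length = 0 then some []
    else specVloop strings memo0 t strings none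
  termination_by (t.length + 1, 0)
  decreasing_by all_goals (simp [Prod.lex_iff]; try omega)

def specVloop (strings : List String) (memo0 : PySem.Dict String (Option (List String))) (t : String) :
    List String → Option (List String) → Option (List String)
  | [], b => b
  | s :: rest, b =>
    let b' :=
      if h : 0 < s.length ∧ (s.length : Int) ≤ PySem.Str.len t ∧ PySem.Str.slice t none (some (s.length : Int)) = s
      then mergeBest b (specV strings memo0 (PySem.Str.slice t (some (s.length : Int)) none))
      else b
    specVloop strings memo0 t rest b'
  termination_by rest _ => (t.length, rest.length + 1)
  decreasing_by
    · simp only [Prod.lex_iff, strSliceFrom_length]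
      simp only [PySem.Str.len_eq, String.length_toList] at h
      omega
    · simp [Prod.lex_iff]
end

-- string bridge lemmas
theorem strSliceTo_toList (t : String) (L : Nat) :
    (PySem.Str.slice t none (some (L : Int))).toList = t.toList.take L := by
  rw [PySem.Str.toList_slice, PySem.Chars.slice_eq_listSlice, PySem.List.slice_to_natCast]

theorem strSliceFrom_toList (t : String) (a : Nat) :
    (PySem.Str.slice t (some (a : Int)) none).toList = t.toList.drop a := by
  rw [PySem.Str.toList_slice, PySem.Chars.slice_eq_listSlice, PySem.List.slice_from_natCast]

theorem strSliceSeg_toList (t : String) (i L : Nat) :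
    (PySem.Str.slice t (some (i : Int)) (some ((i : Int) + (L : Int)))).toList
      = (t.toList.drop i).take L := by
  rw [PySem.Str.toList_slice, PySem.Chars.slice_eq_listSlice, PySem.List.slice_natCast_add]

theorem strSliceFrom_zero (t : String) : PySem.Str.slice t (some ((0 : Nat) : Int)) none = t := by
  apply String.toList_inj.mp
  rw [strSliceFrom_toList, List.drop_zero]

theorem strSliceFrom_from (t : String) (a b : Nat) :
    PySem.Str.slice (PySem.Str.slice t (some (a : Int)) none) (some (b : Int)) none
      = PySem.Str.slice t (some ((a + b : Nat) : Int)) none := by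
  apply String.toList_inj.mp
  rw [strSliceFrom_toList, strSliceFrom_toList, strSliceFrom_toList, List.drop_drop]

-- invariant that the memo dict only carries already-correct values (w.r.t. the spec)
-- A-side: correctness of the memoized recursion, by induction on the fuel.
theorem bcAloop_correct (strings : List String)
    (memo0 : PySem.Dict String (Option (List String))) (f : Nat)
    (IH : ∀ t memo, t.length + 2 ≤ f →
      (∀ k v, PySem.Dict.get? memo k = some v → k.length ≤ t.length → v = specV strings memo0 k) →
      (∀ k v, PySem.Dict.get? memo0 k = some v → PySem.Dict.get? memo k = some v) →
      ((bcA f t strings memo).1 = specV strings memo0 t ∧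
       (∀ k v, PySem.Dict.get? (bcA f t strings memo).2 k = some v → k.length ≤ t.length →
          v = specV strings memo0 k) ∧
       (∀ k, t.length < k.length →
          PySem.Dict.get? (bcA f t strings memo).2 k = PySem.Dict.get? memo k) ∧
       (∀ k v, PySem.Dict.get? memo0 k = some v →
          PySem.Dict.get? (bcA f t strings memo).2 k = some v)))
    (t : String) (hf : t.length + 1 ≤ f) (hm0t : PySem.Dict.get? memo0 t = none) :
    ∀ rest b memo,
      PySem.Dict.get? memo t = some b →
      (∀ k v, PySem.Dict.get? memo k = some v → k ≠ t → k.length ≤ t.length →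
         v = specV strings memo0 k) →
      (∀ k v, PySem.Dict.get? memo0 k = some v → PySem.Dict.get? memo k = some v) →
      (PySem.Dict.get? (bcAloop f t strings rest memo) t
          = some (specVloop strings memo0 t rest b) ∧
       (∀ k v, PySem.Dict.get? (bcAloop f t strings rest memo) k = some v → k ≠ t →
          k.length ≤ t.length → v = specV strings memo0 k) ∧
       (∀ k, t.length < k.length →
          PySem.Dict.get? (bcAloop f t strings rest memo) k = PySem.Dict.get? memo k) ∧
       (∀ k v, PySem.Dict.get? memo0 k = some v →
          PySem.Dict.get? (bcAloop f t strings rest memo) k = some v)) := by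
  intro rest
  induction rest with
  | nil =>
    intro b memo hmt hgood hsub
    have h1 : bcAloop f t strings [] memo = memo := by simp [bcAloop]
    have h2 : specVloop strings memo0 t [] b = b := by simp [specVloop]
    rw [h1, h2]
    exact ⟨hmt, hgood, fun _ _ => rfl, hsub⟩
  | cons s rest ihrest =>
    intro b memo hmt hgood hsub
    by_cases hg : ((s.length : Int) ≤ (t.length : Int) ∧
        PySem.Str.slice t none (some (s.length : Int)) = s)
    · by_cases hs0 : s.length = 0
      · -- s = "": the recursive call hits the in-progress memo entry and is a no-op
        have hst : PySem.Str.slice t (some (s.length : Int)) none = t := by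
          rw [hs0]; exact_mod_cast strSliceFrom_zero t
        rcases f with _ | f'
        · omega
        have hcall : bcA (Nat.succ f') t strings memo = (b, memo) := by
          simp [bcA, hmt]
        have hnoop : ∀ res : Option (List String) × PySem.Dict String (Option (List String)),
            res = (b, memo) →
            (match res.1 with
              | none => res.2
              | some sol =>
                match (PySem.Dict.get? res.2 t).getD none with
                | none => PySem.Dict.insert res.2 t (some sol)
                | some cur =>
                  if sol.length < cur.length then PySem.Dict.insert res.2 t (some sol)
                  else res.2) = memo := by
          intro res hres; subst hres
          cases b with
          | none => rfl
          | some c => simp [hmt]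
        have hloop : bcAloop (Nat.succ f') t strings (s :: rest) memo
            = bcAloop (Nat.succ f') t strings rest memo := by
          simp only [bcAloop, PySem.Str.len_eq, String.length_toList]
          rw [if_pos hg, hst, hcall]
          exact congrArg _ (by
            have := hnoop (b, memo) rfl
            simpa using this)
        have hV : specVloop strings memo0 t (s :: rest) b = specVloop strings memo0 t rest b := by
          simp only [specVloop]
          rw [dif_neg (by intro hh; exact absurd hh.1 (by omega))]
        rw [hloop, hV]
        exact ihrest b memo hmt hgood hsub
      · -- 0 < s.length: genuine recursive call on a strictly shorter suffix
        have hsl : 0 < s.length := Nat.pos_of_ne_zero hs0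
        have htl : s.length ≤ t.length := by exact_mod_cast hg.1
        set r := PySem.Str.slice t (some (s.length : Int)) none with hr
        have hrlen : r.length = t.length - s.length := strSliceFrom_length t s.length
        have hrlt : r.length < t.length := by omega
        obtain ⟨hA1, hA2, hA3, hA4⟩ := IH r memo (by omega)
          (fun k v hk hkl => hgood k v hk (by intro he; subst he; omega) (by omega))
          hsub
        set res := bcA f r strings memo with hres
        have hrt : PySem.Dict.get? res.2 t = some b := by rw [hA3 t (by omega)]; exact hmt
        -- the updated memo after this iteration
        set memo2 := (match res.1 with
          | none => res.2
          | some sol =>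
            match (PySem.Dict.get? res.2 t).getD none with
            | none => PySem.Dict.insert res.2 t (some sol)
            | some cur =>
              if sol.length < cur.length then PySem.Dict.insert res.2 t (some sol)
              else res.2) with hmemo2
        have hm2t : PySem.Dict.get? memo2 t = some (mergeBest b (specV strings memo0 r)) := by
          rw [hmemo2, ← hA1]
          cases hx : res.1 with
          | none => simp [mergeBest, hrt]
          | some sol =>
            rw [hrt]
            cases b with
            | none => simp [mergeBest]
            | some c =>
              by_cases hlt : sol.length < c.length
              · simp [mergeBest, hlt]
              · simp [mergeBest, hlt, hrt]
        have hm2get : ∀ k, k ≠ t → PySem.Dict.get? memo2 k = PySem.Dict.get? res.2 k := by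
          intro k hkt
          rw [hmemo2]
          cases hx : res.1 with
          | none => rfl
          | some sol =>
            cases hy : (PySem.Dict.get? res.2 t).getD none with
            | none => simp [PySem.Dict.get?_insert, hkt]
            | some cur =>
              by_cases hlt : sol.length < cur.length
              · simp [hlt, PySem.Dict.get?_insert, hkt]
              · simp [hlt]
        have hgood2 : ∀ k v, PySem.Dict.get? memo2 k = some v → k ≠ t → k.length ≤ t.length →
            v = specV strings memo0 k := by
          intro k v hk hkt hkl
          rw [hm2get k hkt] at hk
          by_cases hkr : k.length ≤ r.length
          · exact hA2 k v hk hkr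
          · rw [hA3 k (by omega)] at hk
            exact hgood k v hk hkt hkl
        have hsub2 : ∀ k v, PySem.Dict.get? memo0 k = some v →
            PySem.Dict.get? memo2 k = some v := by
          intro k v hk
          have hkt : k ≠ t := by intro he; subst he; rw [hm0t] at hk; simp at hk
          rw [hm2get k hkt]
          exact hA4 k v hk
        obtain ⟨C1, C2, C3, C4⟩ := ihrest (mergeBest b (specV strings memo0 r)) memo2 hm2t hgood2 hsub2
        have hloop : bcAloop f t strings (s :: rest) memo
            = bcAloop f t strings rest memo2 := by
          simp only [bcAloop, PySem.Str.len_eq, String.length_toList]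
          rw [if_pos hg, ← hr, ← hres, hmemo2]
        have hV : specVloop strings memo0 t (s :: rest) b
            = specVloop strings memo0 t rest (mergeBest b (specV strings memo0 r)) := by
          simp only [specVloop, PySem.Str.len_eq, String.length_toList]
          rw [dif_pos ⟨hsl, hg.1, hg.2⟩]
        refine ⟨?_, ?_, ?_, ?_⟩
        · rw [hloop, hV]; exact C1
        · rw [hloop]; exact C2
        · intro k hk
          rw [hloop, C3 k hk, hm2get k (by intro he; subst he; omega), hA3 k (by omega)]
        · rw [hloop]; exact C4
    · -- guard false: nothing happens on either side
      have hloop : bcAloop f t strings (s :: rest) memo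
          = bcAloop f t strings rest memo := by
        simp only [bcAloop, PySem.Str.len_eq, String.length_toList]
        rw [if_neg hg]
      have hV : specVloop strings memo0 t (s :: rest) b = specVloop strings memo0 t rest b := by
        simp only [specVloop, PySem.Str.len_eq, String.length_toList]
        rw [dif_neg (by intro hh; exact hg ⟨hh.2.1, hh.2.2⟩)]
      rw [hloop, hV]
      exact ihrest b memo hmt hgood hsub

theorem bcA_correct (strings : List String)
    (memo0 : PySem.Dict String (Option (List String))) :
    ∀ f t memo, t.length + 2 ≤ f →
      (∀ k v, PySem.Dict.get? memo k = some v → k.length ≤ t.length → v = specV strings memo0 k) →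
      (∀ k v, PySem.Dict.get? memo0 k = some v → PySem.Dict.get? memo k = some v) →
      ((bcA f t strings memo).1 = specV strings memo0 t ∧
       (∀ k v, PySem.Dict.get? (bcA f t strings memo).2 k = some v → k.length ≤ t.length →
          v = specV strings memo0 k) ∧
       (∀ k, t.length < k.length →
          PySem.Dict.get? (bcA f t strings memo).2 k = PySem.Dict.get? memo k) ∧
       (∀ k v, PySem.Dict.get? memo0 k = some v →
          PySem.Dict.get? (bcA f t strings memo).2 k = some v)) := by
  intro f
  induction f with
  | zero => intro t memo hf; omega
  | succ f ih =>
    intro t memo hf hgood hsub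
    rcases hmt : PySem.Dict.get? memo t with _ | v
    · -- target not in memo
      have hm0t : PySem.Dict.get? memo0 t = none := by
        rcases hx : PySem.Dict.get? memo0 t with _ | w
        · rfl
        · rw [hsub t w hx] at hmt; simp at hmt
      by_cases h0 : t.length = 0
      · have hcall : bcA (Nat.succ f) t strings memo = (some [], memo) := by
          simp [bcA, hmt, PySem.Str.len_eq, h0]
        rw [hcall]
        refine ⟨?_, hgood, fun _ _ => rfl, hsub⟩
        simp [specV, hm0t, h0]
      · have hmem1t : PySem.Dict.get? (PySem.Dict.insert memo t none) t = some none :=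
          PySem.Dict.get?_insert_self memo t none
        obtain ⟨C1, C2, C3, C4⟩ := bcAloop_correct strings memo0 f
          (fun t' memo' h1 h2 h3 => ih t' memo' (by omega) h2 h3) t (by omega) hm0t
          strings none (PySem.Dict.insert memo t none) hmem1t
          (fun k v hk hkt hkl => hgood k v (by rwa [PySem.Dict.get?_insert_of_ne _ _ hkt] at hk) hkl)
          (fun k v hk => by
            have hkt : k ≠ t := by intro he; subst he; rw [hm0t] at hk; simp at hk
            rw [PySem.Dict.get?_insert_of_ne _ _ hkt]
            exact hsub k v hk)
        have hcall : bcA (Nat.succ f) t strings memo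
            = ((PySem.Dict.get? (bcAloop f t strings strings (PySem.Dict.insert memo t none)) t).getD none,
               bcAloop f t strings strings (PySem.Dict.insert memo t none)) := by
          simp [bcA, hmt, PySem.Str.len_eq, h0]
        rw [hcall]
        have hspec : specV strings memo0 t = specVloop strings memo0 t strings none := by
          simp [specV, hm0t, h0]
        refine ⟨?_, ?_, ?_, C4⟩
        · rw [C1]; simp [hspec]
        · intro k v hk hkl
          by_cases hkt : k = t
          · subst hkt
            rw [C1] at hk
            rw [hspec]
            exact (Option.some_inj.mp hk).symm
          · exact C2 k v hk hkt hkl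
        · intro k hk
          have hkt : k ≠ t := by intro he; subst he; omega
          rw [C3 k hk, PySem.Dict.get?_insert_of_ne _ _ hkt]
    · -- target in memo: returned directly
      have hcall : bcA (Nat.succ f) t strings memo = (v, memo) := by simp [bcA, hmt]
      rw [hcall]
      exact ⟨hgood t v hmt (le_refl _), hgood, fun _ _ => rfl, hsub⟩

-- B-side: the bottom-up DP array computes the same specification
theorem strLenZero (s : String) (h : s.length = 0) : s = "" := by
  apply String.toList_inj.mp
  have h2 : s.toList = [] := List.eq_nil_of_length_eq_zero (by rwa [String.length_toList])
  rw [h2]; rfl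

theorem innerFold_eq (t : String) (strings : List String)
    (lookup : PySem.Dict String (Option (List String))) (i : Nat) (hin : i < t.length)
    (val : List (Option (List String)))
    (hval : ∀ j, i < j → j ≤ t.length →
      val.getD j none = specV strings lookup (PySem.Str.slice t (some (j : Int)) none)) :
    ∀ (ss : List String) (b : Option (List String)),
      ss.foldl (fun best s =>
        if s ≠ "" ∧ PySem.Str.slice t (some (i : Int)) (some ((i : Int) + (s.length : Int))) = s then
          match val.getD (i + s.length) none with
          | none => best
          | some cand =>
            match best with
            | none => some cand
            | some b => if cand.length < b.length then some cand else best
        else best) b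
      = specVloop strings lookup (PySem.Str.slice t (some (i : Int)) none) ss b := by
  intro ss
  induction ss with
  | nil => intro b; simp [specVloop]
  | cons s rest ih =>
    intro b
    set u := PySem.Str.slice t (some (i : Int)) none with hu
    have hulen : u.length = t.length - i := strSliceFrom_length t i
    have hstep : (if s ≠ "" ∧ PySem.Str.slice t (some (i : Int)) (some ((i : Int) + (s.length : Int))) = s then
          match val.getD (i + s.length) none with
          | none => b
          | some cand =>
            match b with
            | none => some cand
            | some bb => if cand.length < bb.length then some cand else b
        else b)
        = (if 0 < s.length ∧ (s.length : Int) ≤ PySem.Str.len u ∧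
              PySem.Str.slice u none (some (s.length : Int)) = s
           then mergeBest b (specV strings lookup (PySem.Str.slice u (some (s.length : Int)) none))
           else b) := by
      by_cases hg : (s ≠ "" ∧ PySem.Str.slice t (some (i : Int)) (some ((i : Int) + (s.length : Int))) = s)
      · obtain ⟨hs, hseg⟩ := hg
        have hsl : 0 < s.length := by
          rcases Nat.eq_zero_or_pos s.length with h0 | h0
          · exact absurd (strLenZero s h0) hs
          · exact h0
        have hsegl : s.toList = (t.toList.drop i).take s.length := by
          rw [← strSliceSeg_toList t i s.length, hseg]
        have hlen2 : s.length ≤ t.length - i := by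
          have := congrArg List.length hsegl
          simp [String.length_toList] at this
          omega
        have hto : PySem.Str.slice u none (some (s.length : Int)) = s := by
          apply String.toList_inj.mp
          rw [strSliceTo_toList, hu, strSliceFrom_toList, ← hsegl]
        have hfrom : PySem.Str.slice u (some (s.length : Int)) none
            = PySem.Str.slice t (some ((i + s.length : Nat) : Int)) none := by
          rw [hu, strSliceFrom_from]
        have hcand : val.getD (i + s.length) none
            = specV strings lookup (PySem.Str.slice u (some (s.length : Int)) none) := by
          rw [hfrom]
          exact hval (i + s.length) (by omega) (by omega)
        rw [if_pos ⟨hs, hseg⟩, if_pos ⟨hsl, by simp only [PySem.Str.len_eq, String.length_toList, hulen]; exact_mod_cast by omega, hto⟩, hcand]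
        cases specV strings lookup (PySem.Str.slice u (some (s.length : Int)) none) with
        | none => cases b <;> rfl
        | some cand => cases b <;> simp [mergeBest]
      · rw [if_neg hg]
        have : ¬(0 < s.length ∧ (s.length : Int) ≤ PySem.Str.len u ∧
            PySem.Str.slice u none (some (s.length : Int)) = s) := by
          intro hh
          apply hg
          have hut : u.toList = t.toList.drop i := by rw [hu, strSliceFrom_toList]
          have hsto := congrArg String.toList hh.2.2
          rw [strSliceTo_toList] at hsto
          constructor
          · intro he; subst he; simp at hh
          · apply String.toList_inj.mp
            rw [strSliceSeg_toList, ← hut]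
            exact hsto
        rw [if_neg this]
    have hVcons : specVloop strings lookup u (s :: rest) b
        = specVloop strings lookup u rest
            (if 0 < s.length ∧ (s.length : Int) ≤ PySem.Str.len u ∧
                PySem.Str.slice u none (some (s.length : Int)) = s
             then mergeBest b (specV strings lookup (PySem.Str.slice u (some (s.length : Int)) none))
             else b) := by
      simp only [specVloop]
      split_ifs <;> rfl
    rw [List.foldl_cons, hstep, hVcons, ← ih]

theorem outerFold_eq (t : String) (strings : List String)
    (lookup : PySem.Dict String (Option (List String))) :
    ∀ (i : Nat), i ≤ t.length + 1 →
    ∀ (val : List (Option (List String))), val.length = t.length + 1 →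
      (∀ j, i ≤ j → j ≤ t.length →
        val.getD j none = specV strings lookup (PySem.Str.slice t (some (j : Int)) none)) →
      (∀ j, j ≤ t.length →
        (((List.range i).reverse).foldl (fun (val : List (Option (List String))) (i : Nat) =>
          let suffix := PySem.Str.slice t (some (i : Int)) none
          match PySem.Dict.get? lookup suffix with
          | some v => val.set i v
          | none =>
            if i = t.length then val.set i (some [])
            else
              let best := strings.foldl (fun best s =>
                if s ≠ "" ∧ PySem.Str.slice t (some (i : Int)) (some ((i : Int) + (s.length : Int))) = s then
                  match val.getD (i + s.length) none with
                  | none => best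
                  | some cand =>
                    match best with
                    | none => some cand
                    | some b => if cand.length < b.length then some cand else best
                else best) none
              val.set i best) val).getD j none
          = specV strings lookup (PySem.Str.slice t (some (j : Int)) none)) := by
  intro i
  induction i with
  | zero =>
    intro _ val hlen hval j hj
    simpa using hval j (Nat.zero_le j) hj
  | succ i ih =>
    intro hi val hlen hval
    have hrange : (List.range (i + 1)).reverse = i :: (List.range i).reverse := by
      simp [List.range_succ]
    rw [hrange]
    intro j hj
    rw [List.foldl_cons]
    -- the value written at index i
    set u := PySem.Str.slice t (some (i : Int)) none with hu
    have hulen : u.length = t.length - i := strSliceFrom_length t i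
    have hile : i ≤ t.length := by omega
    have hstepval : ∀ (j' : Nat) (w : Option (List String)), j' ≤ t.length →
        (val.set i w).getD j' none = if j' = i then w else val.getD j' none := by
      intro j' w hj'
      by_cases hji : j' = i
      · subst hji
        simp [List.getD_eq_getElem?_getD, List.getElem?_set_self (by omega : j' < val.length)]
      · simp [List.getD_eq_getElem?_getD, List.getElem?_set_ne (fun h => hji h.symm), hji]
    -- each branch of the step writes specV of the suffix at i
    have hwrite : ∀ val', val' = (match PySem.Dict.get? lookup u with
          | some v => val.set i v
          | none =>
            if i = t.length then val.set i (some [])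
            else
              val.set i (strings.foldl (fun best s =>
                if s ≠ "" ∧ PySem.Str.slice t (some (i : Int)) (some ((i : Int) + (s.length : Int))) = s then
                  match val.getD (i + s.length) none with
                  | none => best
                  | some cand =>
                    match best with
                    | none => some cand
                    | some b => if cand.length < b.length then some cand else best
                else best) none)) →
          val'.length = t.length + 1 ∧
          (∀ j', i ≤ j' → j' ≤ t.length →
            val'.getD j' none = specV strings lookup (PySem.Str.slice t (some (j' : Int)) none)) := by
      intro val' hval'
      have hspecu : (match PySem.Dict.get? lookup u with
          | some v => val.set i v
          | none =>
            if i = t.length then val.set i (some [])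
            else
              val.set i (strings.foldl (fun best s =>
                if s ≠ "" ∧ PySem.Str.slice t (some (i : Int)) (some ((i : Int) + (s.length : Int))) = s then
                  match val.getD (i + s.length) none with
                  | none => best
                  | some cand =>
                    match best with
                    | none => some cand
                    | some b => if cand.length < b.length then some cand else best
                else best) none)) = val.set i (specV strings lookup u) := by
        rcases hm : PySem.Dict.get? lookup u with _ | v
        · by_cases hin : i = t.length
          · have hu0 : u.length = 0 := by omega
            have : specV strings lookup u = some [] := by
              rw [specV, hm]
              simp [hu0]
            rw [this, if_pos hin]
          · have hilt : i < t.length := by omega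
            have hu0 : u.length ≠ 0 := by omega
            have : specV strings lookup u
                = specVloop strings lookup u strings none := by
              rw [specV, hm]
              simp [hu0]
            rw [this, if_neg hin, innerFold_eq t strings lookup i hilt val
              (fun j' hj1 hj2 => hval j' (by omega) hj2), hu]
        · have hv : specV strings lookup u = v := by rw [specV, hm]
          rw [hv]
      rw [hval', hspecu]
      refine ⟨by simp [hlen], ?_⟩
      intro j' hj1 hj2
      rw [hstepval j' _ hj2]
      by_cases hji : j' = i
      · simp [hji, hu]
      · rw [if_neg hji]
        exact hval j' (by omega) hj2
    obtain ⟨hlen', hval'⟩ := hwrite _ rfl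
    exact ih (by omega) _ hlen' hval' j hj

theorem alt_eq_specV (target_string : String) (strings : List String)
    (memo : Option (List (String × Option (List String)))) :
    best_construct_alt target_string strings memo
      = specV strings (PySem.Dict.ofList (memo.getD [])) target_string := by
  rcases hm : PySem.Dict.get? (PySem.Dict.ofList (memo.getD [])) target_string with _ | v
  · have h0 : PySem.Str.slice target_string (some ((0 : Nat) : Int)) none = target_string :=
      strSliceFrom_zero target_string
    have := outerFold_eq target_string strings (PySem.Dict.ofList (memo.getD []))
      (target_string.length + 1) (le_refl _)
      (List.replicate (target_string.length + 1) none) (by simp)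
      (fun j hj1 hj2 => by omega) 0 (Nat.zero_le _)
    rw [h0] at this
    simp only [best_construct_alt, hm]
    exact this
  · simp only [best_construct_alt, hm]
    rw [specV, hm]

-- ===== VERDICT (by name: the statement is the Claim_ definition above) =====
theorem best_construct_spec : Claim_equal_best_construct := by
  intro target_string strings memo _
  unfold Spec_best_construct
  rw [alt_eq_specV]
  unfold best_construct
  obtain ⟨h1, _, _, _⟩ := bcA_correct strings (PySem.Dict.ofList (memo.getD []))
    (target_string.length + 2) target_string (PySem.Dict.ofList (memo.getD []))
    (le_refl _)
    (fun k v hk _ => by rw [specV, hk])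
    (fun _ _ hk => hk)
  exact h1
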